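-- pv_equiv track=rewrite | github.com/xinpw8/pokegym | pokegym/BACKUP_old_environment_files.py | calculate_event_rewards
-- ===== SOURCE A (Python) =====
-- def calculate_event_rewards(events_dict, base_reward=10, reward_increment=1, reward_multiplier=1):
--     """
--     Calculate total rewards for events in a dictionary.
--
--     :param events_dict: Dictionary containing event completion status with associated points.
--     :param base_reward: The starting reward for the first event.
--     :param reward_increment: How much to increase the reward for each subsequent event.
--     :param reward_multiplier: Multiplier to adjust rewards' significance.
--     :return: Total reward calculated for all events.
--     """
--     total_reward = 0
--     current_reward = base_reward
--     assert isinstance(events_dict, dict), f"Expected dict, got {type(events_dict)}\nvariable={events_dict}"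
--
--     for event, points in events_dict.items():
--         if points > 0:  # Assuming positive points indicate completion or achievement
--             total_reward += current_reward * points * reward_multiplier
--             current_reward += reward_increment
--     return total_reward
-- ===== SOURCE B (Python) =====
-- def calculate_event_rewards(events_dict, base_reward=10, reward_increment=1, reward_multiplier=1):
--     assert isinstance(events_dict, dict), f"Expected dict, got {type(events_dict)}\nvariable={events_dict}"
--     # Algebraic rearrangement: total = m * (base * S + inc * W),
--     # S = sum of positive points, W = sum_i i * p_i, computed via a
--     # reversed suffix-sum pass (W accumulates the running suffix sums).
--     positives = [p for p in events_dict.values() if p > 0]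
--     suffix = 0
--     weighted = 0
--     for p in reversed(positives):
--         weighted += suffix
--         suffix += p
--     return reward_multiplier * (base_reward * suffix + reward_increment * weighted)
-- ===== Notes on version B (the rewrite author's own statement) =====
-- stated objective: alternative
-- what changed: Replaces the per-item reward computation (current_reward * points each step) by the algebraic closed form m*(base*S + inc*W): S is the sum of positive points and W = sum_i i*p_i is obtained from a reversed suffix-sum pass, so no per-event reward is ever formed.
import Mathlib
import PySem

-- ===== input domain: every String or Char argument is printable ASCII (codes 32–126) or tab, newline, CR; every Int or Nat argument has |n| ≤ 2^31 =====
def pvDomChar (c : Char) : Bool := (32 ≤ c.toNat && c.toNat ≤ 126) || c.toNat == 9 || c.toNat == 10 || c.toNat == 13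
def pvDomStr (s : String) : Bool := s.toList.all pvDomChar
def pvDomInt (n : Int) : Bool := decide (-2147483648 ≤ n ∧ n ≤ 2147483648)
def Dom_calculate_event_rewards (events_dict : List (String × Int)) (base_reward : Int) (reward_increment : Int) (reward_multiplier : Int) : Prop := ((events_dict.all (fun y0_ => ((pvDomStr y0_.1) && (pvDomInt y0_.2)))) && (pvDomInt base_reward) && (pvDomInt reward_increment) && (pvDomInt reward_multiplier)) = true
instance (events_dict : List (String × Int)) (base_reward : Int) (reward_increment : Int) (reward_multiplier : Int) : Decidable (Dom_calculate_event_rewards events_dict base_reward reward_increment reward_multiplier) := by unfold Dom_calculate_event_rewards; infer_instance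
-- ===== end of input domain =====

-- B replaces A's per-item reward arithmetic (current_reward * points at each step) by the
-- algebraic closed form m*(base*S + inc*W), with S the sum of positive points and
-- W = Σ i·pᵢ computed by a reversed suffix-sum pass. Objective: alternative algorithm.

-- ===== PORT A =====
-- single pass over items, state = (total_reward, current_reward)
def calculate_event_rewards (events_dict : List (String × Int)) (base_reward : Int) (reward_increment : Int) (reward_multiplier : Int) : Int :=
  (events_dict.foldl
    (fun (s : Int × Int) ep =>
      if ep.2 > 0 then (s.1 + s.2 * ep.2 * reward_multiplier, s.2 + reward_increment) else s)
    (0, base_reward)).1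

-- ===== PORT B =====
-- filter the positive values; reversed suffix-sum pass, state = (suffix, weighted);
-- combine by the closed form m * (base * suffix + inc * weighted)
def calculate_event_rewards_alt (events_dict : List (String × Int)) (base_reward : Int) (reward_increment : Int) (reward_multiplier : Int) : Int :=
  let positives := (events_dict.map (fun p => p.2)).filter (fun p => p > 0)
  let sw := positives.reverse.foldl (fun (s : Int × Int) p => (s.1 + p, s.2 + s.1)) (0, 0)
  reward_multiplier * (base_reward * sw.1 + reward_increment * sw.2)

-- ===== PRECONDITION & SPEC =====
def Spec_calculate_event_rewards (events_dict : List (String × Int)) (base_reward : Int) (reward_increment : Int) (reward_multiplier : Int) (out : Int) : Prop := out = calculate_event_rewards_alt events_dict base_reward reward_increment reward_multiplier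
instance (events_dict : List (String × Int)) (base_reward : Int) (reward_increment : Int) (reward_multiplier : Int) (out : Int) : Decidable (Spec_calculate_event_rewards events_dict base_reward reward_increment reward_multiplier out) := by unfold Spec_calculate_event_rewards; infer_instance

-- ===== CLAIM (what is proved, stated in full; the proofs are below) =====
def Claim_equal_calculate_event_rewards : Prop := ∀ (events_dict : List (String × Int)) (base_reward : Int) (reward_increment : Int) (reward_multiplier : Int), Dom_calculate_event_rewards events_dict base_reward reward_increment reward_multiplier → Spec_calculate_event_rewards events_dict base_reward reward_increment reward_multiplier (calculate_event_rewards events_dict base_reward reward_increment reward_multiplier)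

-- ===== LEMMAS AND PROOFS =====

-- W(xs) := Σ i·xs[i], as a helper for the proofs only
def pvW (xs : List Int) : Int :=
  ((PySem.List.enumerate xs 0).map (fun ip => ip.1 * ip.2)).sum

-- shifting the enumerate start adds s·sum
theorem pv_enum_mul (xs : List Int) :
    ∀ s : Int, ((PySem.List.enumerate xs s).map (fun ip => ip.1 * ip.2)).sum
      = s * xs.sum + pvW xs := by
  induction xs with
  | nil => intro s; simp [pvW, PySem.List.enumerate]
  | cons x xs ih =>
    intro s
    simp only [pvW, PySem.List.enumerate_cons, List.map_cons, List.sum_cons]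
    rw [ih (s + 1), ih (0 + 1)]
    ring

-- B's reversed fold computes (sum, W)
theorem pv_rev (xs : List Int) :
    xs.reverse.foldl (fun (s : Int × Int) p => (s.1 + p, s.2 + s.1)) (0, 0)
      = (xs.sum, pvW xs) := by
  induction xs with
  | nil => simp [pvW, PySem.List.enumerate]
  | cons x xs ih =>
    simp only [List.reverse_cons, List.foldl_append, ih, List.foldl_cons, List.foldl_nil]
    have hW : pvW (x :: xs) = pvW xs + xs.sum := by
      simp only [pvW, PySem.List.enumerate_cons, List.map_cons, List.sum_cons]
      rw [pv_enum_mul xs (0 + 1), pv_enum_mul xs 0]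
      ring
    simp [hW, List.sum_cons]
    ring

-- A's fold, from any state (t, c), equals t + m*(c*S + inc*W) over the remaining positives
theorem pv_key (inc m : Int) (l : List (String × Int)) :
    ∀ (t c : Int),
      (l.foldl
        (fun (s : Int × Int) ep =>
          if ep.2 > 0 then (s.1 + s.2 * ep.2 * m, s.2 + inc) else s)
        (t, c)).1
      = t + m * (c * ((l.map (fun p => p.2)).filter (fun p => p > 0)).sum
                 + inc * pvW ((l.map (fun p => p.2)).filter (fun p => p > 0))) := by
  induction l with
  | nil => intro t c; simp [pvW]
  | cons p l ih =>
    intro t c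
    by_cases h : p.2 > 0
    · have hW : pvW (p.2 :: (l.map (fun q => q.2)).filter (fun q => q > 0))
          = pvW ((l.map (fun q => q.2)).filter (fun q => q > 0))
            + ((l.map (fun q => q.2)).filter (fun q => q > 0)).sum := by
        simp only [pvW, PySem.List.enumerate_cons, List.map_cons, List.sum_cons]
        rw [pv_enum_mul _ (0 + 1), pv_enum_mul _ 0]
        ring
      simp only [List.foldl_cons, List.map_cons, List.filter_cons, h, decide_true, if_pos, ih,
        List.sum_cons, hW]
      ring
    · simp only [List.foldl_cons, List.map_cons, List.filter_cons, h, decide_false,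
        Bool.false_eq_true, if_false, ih]

-- ===== VERDICT (by name: the statement is the Claim_ definition above) =====
theorem calculate_event_rewards_spec : Claim_equal_calculate_event_rewards := by
  intro ed b inc m _
  unfold Spec_calculate_event_rewards calculate_event_rewards calculate_event_rewards_alt
  simp only [pv_key, pv_rev]
  ring
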